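-- pv_equiv track=rewrite | github.com/gitrepohub-cpu/mcp-crpto-order-flow-server | src/tools/visualization_tools.py | _get_overlay_panel_mapping
-- ===== SOURCE A (Python) =====
-- from typing import Dict, List, Optional, Any, Tuple
-- from collections import defaultdict
--
-- def _get_overlay_panel_mapping(overlays: List[str]) -> Dict[str, List[str]]:
--     """Map overlay features to chart panels."""
--     panel_mapping = defaultdict(list)
--
--     overlay_panels = {
--         # Price panel overlays
--         'microprice': 'price_panel',
--         'vwap': 'price_panel',
--         'support_strength': 'price_panel',
--         'resistance_strength': 'price_panel',
--
--         # Volume panel overlays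
--         'volume': 'volume_panel',
--         'buy_volume': 'volume_panel',
--         'sell_volume': 'volume_panel',
--         'cvd': 'volume_panel',
--
--         # Momentum panel
--         'momentum_quality': 'momentum_panel',
--         'momentum_exhaustion': 'momentum_panel',
--         'hurst_exponent': 'momentum_panel',
--
--         # Risk panel
--         'leverage_index': 'risk_panel',
--         'liquidation_cascade_risk': 'risk_panel',
--         'risk_score': 'risk_panel',
--
--         # Orderbook panel
--         'depth_imbalance_5': 'orderbook_panel',
--         'depth_imbalance_10': 'orderbook_panel',
--         'absorption_ratio': 'orderbook_panel',
--
--         # Funding panel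
--         'funding_rate': 'funding_panel',
--         'funding_zscore': 'funding_panel',
--     }
--
--     for overlay in overlays:
--         panel = overlay_panels.get(overlay, 'auxiliary_panel')
--         panel_mapping[panel].append(overlay)
--
--     return dict(panel_mapping)
-- ===== SOURCE B (Python) =====
-- _PANELS = [
--     ('price_panel', ['microprice', 'vwap', 'support_strength', 'resistance_strength']),
--     ('volume_panel', ['volume', 'buy_volume', 'sell_volume', 'cvd']),
--     ('momentum_panel', ['momentum_quality', 'momentum_exhaustion', 'hurst_exponent']),
--     ('risk_panel', ['leverage_index', 'liquidation_cascade_risk', 'risk_score']),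
--     ('orderbook_panel', ['depth_imbalance_5', 'depth_imbalance_10', 'absorption_ratio']),
--     ('funding_panel', ['funding_rate', 'funding_zscore']),
-- ]
--
--
-- def _panel_of(overlay):
--     for panel, feats in _PANELS:
--         if overlay in feats:
--             return panel
--     return 'auxiliary_panel'
--
--
-- def _get_overlay_panel_mapping(overlays):
--     panels = [_panel_of(o) for o in overlays]
--     seen = []
--     for p in panels:
--         if p not in seen:
--             seen.append(p)
--     return {p: [o for o, q in zip(overlays, panels) if q == p] for p in seen}
-- ===== Notes on version B (the rewrite author's own statement) =====
-- stated objective: alternative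
-- what changed: A makes one dispatch-and-append pass into a defaultdict; B inverts the table into a panel->features list, computes each overlay's panel, dedups the panels in first-appearance order, and builds each panel's list by filtering the overlays per panel (outer loop over panels, inner filter).
import Mathlib
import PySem

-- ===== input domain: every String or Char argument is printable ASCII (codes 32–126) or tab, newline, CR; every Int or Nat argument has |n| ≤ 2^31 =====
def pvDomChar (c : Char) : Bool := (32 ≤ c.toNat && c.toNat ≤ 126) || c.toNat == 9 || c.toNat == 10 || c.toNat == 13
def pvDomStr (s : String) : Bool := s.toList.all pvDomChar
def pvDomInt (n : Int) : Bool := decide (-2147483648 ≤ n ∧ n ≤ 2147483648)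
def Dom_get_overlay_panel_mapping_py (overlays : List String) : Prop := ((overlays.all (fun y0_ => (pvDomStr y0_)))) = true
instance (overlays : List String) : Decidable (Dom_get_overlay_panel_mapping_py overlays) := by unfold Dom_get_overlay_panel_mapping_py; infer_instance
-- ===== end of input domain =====

-- B groups by iterating the distinct panels (first-appearance order) and filtering the overlays per panel,
-- instead of A's single dispatch-and-append scan into a defaultdict; objective: alternative decomposition.

-- ===== PORT A =====
-- the literal overlay_panels dict of A
def pvOverlayPanels : PySem.Dict String String :=
  PySem.Dict.ofList
    [("microprice", "price_panel"), ("vwap", "price_panel"),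
     ("support_strength", "price_panel"), ("resistance_strength", "price_panel"),
     ("volume", "volume_panel"), ("buy_volume", "volume_panel"),
     ("sell_volume", "volume_panel"), ("cvd", "volume_panel"),
     ("momentum_quality", "momentum_panel"), ("momentum_exhaustion", "momentum_panel"),
     ("hurst_exponent", "momentum_panel"),
     ("leverage_index", "risk_panel"), ("liquidation_cascade_risk", "risk_panel"),
     ("risk_score", "risk_panel"),
     ("depth_imbalance_5", "orderbook_panel"), ("depth_imbalance_10", "orderbook_panel"),
     ("absorption_ratio", "orderbook_panel"),
     ("funding_rate", "funding_panel"), ("funding_zscore", "funding_panel")]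

def get_overlay_panel_mapping_py (overlays : List String) : List (String × List String) :=
  (overlays.foldl
    (fun d o => d.modify (pvOverlayPanels.getD o "auxiliary_panel") [] (· ++ [o]))
    PySem.Dict.empty).items

-- ===== PORT B =====
-- the _PANELS table of Source B (feature sets as distinct-element lists)
def pvPanels : List (String × List String) :=
  [("price_panel", ["microprice", "vwap", "support_strength", "resistance_strength"]),
   ("volume_panel", ["volume", "buy_volume", "sell_volume", "cvd"]),
   ("momentum_panel", ["momentum_quality", "momentum_exhaustion", "hurst_exponent"]),
   ("risk_panel", ["leverage_index", "liquidation_cascade_risk", "risk_score"]),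
   ("orderbook_panel", ["depth_imbalance_5", "depth_imbalance_10", "absorption_ratio"]),
   ("funding_panel", ["funding_rate", "funding_zscore"])]

-- _panel_of: first panel whose feature set contains the overlay, else 'auxiliary_panel'
def pvPanelOf (overlay : String) : String :=
  pvPanelOfAux pvPanels overlay
where pvPanelOfAux : List (String × List String) → String → String
  | [], _ => "auxiliary_panel"
  | (panel, feats) :: rest, o => if feats.contains o then panel else pvPanelOfAux rest o

def get_overlay_panel_mapping_py_alt (overlays : List String) : List (String × List String) :=
  let panels := overlays.map pvPanelOf
  let seen : PySem.Set String := panels.foldl (fun s p => PySem.Set.add s p) PySem.Set.empty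
  seen.map (fun p => (p, ((overlays.zip panels).filter (fun q => q.2 == p)).map (·.1)))

-- ===== PRECONDITION & SPEC =====
def Spec_get_overlay_panel_mapping_py (overlays : List String) (out : List (String × List String)) : Prop := out = get_overlay_panel_mapping_py_alt overlays
instance (overlays : List String) (out : List (String × List String)) : Decidable (Spec_get_overlay_panel_mapping_py overlays out) := by unfold Spec_get_overlay_panel_mapping_py; infer_instance

-- ===== CLAIM (what is proved, stated in full; the proofs are below) =====
def Claim_equal_get_overlay_panel_mapping_py : Prop := ∀ (overlays : List String), Dom_get_overlay_panel_mapping_py overlays → Spec_get_overlay_panel_mapping_py overlays (get_overlay_panel_mapping_py overlays)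

-- ===== LEMMAS AND PROOFS =====

set_option maxHeartbeats 1000000 in
theorem pv_panel_eq (o : String) :
    pvOverlayPanels.getD o "auxiliary_panel" = pvPanelOf o := by
  by_cases h0 : o = "microprice"
  · subst h0; rfl
  by_cases h1 : o = "vwap"
  · subst h1; rfl
  by_cases h2 : o = "support_strength"
  · subst h2; rfl
  by_cases h3 : o = "resistance_strength"
  · subst h3; rfl
  by_cases h4 : o = "volume"
  · subst h4; rfl
  by_cases h5 : o = "buy_volume"
  · subst h5; rfl
  by_cases h6 : o = "sell_volume"
  · subst h6; rfl
  by_cases h7 : o = "cvd"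
  · subst h7; rfl
  by_cases h8 : o = "momentum_quality"
  · subst h8; rfl
  by_cases h9 : o = "momentum_exhaustion"
  · subst h9; rfl
  by_cases h10 : o = "hurst_exponent"
  · subst h10; rfl
  by_cases h11 : o = "leverage_index"
  · subst h11; rfl
  by_cases h12 : o = "liquidation_cascade_risk"
  · subst h12; rfl
  by_cases h13 : o = "risk_score"
  · subst h13; rfl
  by_cases h14 : o = "depth_imbalance_5"
  · subst h14; rfl
  by_cases h15 : o = "depth_imbalance_10"
  · subst h15; rfl
  by_cases h16 : o = "absorption_ratio"
  · subst h16; rfl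
  by_cases h17 : o = "funding_rate"
  · subst h17; rfl
  by_cases h18 : o = "funding_zscore"
  · subst h18; rfl
  have hn : pvOverlayPanels.get? o = none := by
    rw [PySem.Dict.get?_eq_none_iff_not_mem_keys]
    simp only [pvOverlayPanels]
    simp only [show (PySem.Dict.ofList (κ := String) (ν := String)
      [("microprice", "price_panel"), ("vwap", "price_panel"),
       ("support_strength", "price_panel"), ("resistance_strength", "price_panel"),
       ("volume", "volume_panel"), ("buy_volume", "volume_panel"),
       ("sell_volume", "volume_panel"), ("cvd", "volume_panel"),
       ("momentum_quality", "momentum_panel"), ("momentum_exhaustion", "momentum_panel"),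
       ("hurst_exponent", "momentum_panel"),
       ("leverage_index", "risk_panel"), ("liquidation_cascade_risk", "risk_panel"),
       ("risk_score", "risk_panel"),
       ("depth_imbalance_5", "orderbook_panel"), ("depth_imbalance_10", "orderbook_panel"),
       ("absorption_ratio", "orderbook_panel"),
       ("funding_rate", "funding_panel"), ("funding_zscore", "funding_panel")]).keys
      = ["microprice", "vwap", "support_strength", "resistance_strength", "volume", "buy_volume", "sell_volume", "cvd", "momentum_quality", "momentum_exhaustion", "hurst_exponent", "leverage_index", "liquidation_cascade_risk", "risk_score", "depth_imbalance_5", "depth_imbalance_10", "absorption_ratio", "funding_rate", "funding_zscore"] from by decide]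
    simp [h0, h1, h2, h3, h4, h5, h6, h7, h8, h9, h10, h11, h12, h13, h14, h15, h16, h17, h18]
  rw [PySem.Dict.getD_eq_get?_getD, hn]
  simp only [pvPanelOf, pvPanelOf.pvPanelOfAux, pvPanels,
    List.contains_cons, List.contains_nil, beq_iff_eq, Bool.or_eq_true, Option.getD_none]
  simp [h0, h1, h2, h3, h4, h5, h6, h7, h8, h9, h10, h11, h12, h13, h14, h15, h16, h17, h18]

theorem pv_zip_map (overlays : List String) (p : String) :
    ((overlays.zip (overlays.map pvPanelOf)).filter (fun q => q.2 == p)).map (·.1)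
      = overlays.filter (fun o => pvPanelOf o == p) := by
  induction overlays with
  | nil => rfl
  | cons x xs ih =>
    simp only [List.map_cons, List.zip_cons_cons, List.filter_cons]
    by_cases h : pvPanelOf x == p <;> simp [h, ih]

theorem pv_main (overlays : List String) :
    (overlays.foldl
      (fun d o => d.modify (pvOverlayPanels.getD o "auxiliary_panel") [] (· ++ [o]))
      PySem.Dict.empty).items
    = (let panels := overlays.map pvPanelOf
       let seen : PySem.Set String := panels.foldl (fun s p => PySem.Set.add s p) PySem.Set.empty
       seen.map (fun p => (p, ((overlays.zip panels).filter (fun q => q.2 == p)).map (·.1)))) := by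
  simp only [pv_panel_eq]
  set d := overlays.foldl (fun d o => d.modify (pvPanelOf o) [] (· ++ [o])) PySem.Dict.empty with hd
  have hnd : d.keys.Nodup :=
    PySem.Dict.nodup_keys_foldl_modify_key overlays pvPanelOf [] (fun _ o => (· ++ [o])) _ PySem.Dict.nodup_keys_empty
  have hkeys : d.keys = PySem.Set.ofList (overlays.map pvPanelOf) := by
    rw [hd, PySem.Dict.keys_foldl_modify_key]
    simp [PySem.Set.update_nil_left, PySem.Dict.keys_empty]
  have hseen : (overlays.map pvPanelOf).foldl (fun s p => PySem.Set.add s p) PySem.Set.empty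
      = PySem.Set.ofList (overlays.map pvPanelOf) := rfl
  rw [PySem.Dict.items_eq_map_keys d hnd [], hkeys]
  simp only [hseen]
  apply List.map_congr_left
  intro p hp
  congr 1
  rw [pv_zip_map]
  have : d = (overlays.map (fun o => (pvPanelOf o, o))).foldl
      (fun d q => d.modify q.1 [] (· ++ [q.2])) PySem.Dict.empty := by
    rw [hd, List.foldl_map]
  rw [this, PySem.Dict.getD_foldl_modify_append]
  simp [PySem.Dict.getD_empty, List.filter_map, Function.comp_def]

-- ===== VERDICT (by name: the statement is the Claim_ definition above) =====
theorem get_overlay_panel_mapping_py_spec : Claim_equal_get_overlay_panel_mapping_py := by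
  intro overlays _
  unfold Spec_get_overlay_panel_mapping_py get_overlay_panel_mapping_py get_overlay_panel_mapping_py_alt
  exact pv_main overlays
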